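-- pv_equiv track=rewrite | github.com/FuadMimon/task1 | aesthetically_pleasant/solution.py | number_of_ways_of_cutting_one_tree_aesthetically
-- ===== SOURCE A (Python) =====
-- MIN_LEN_A = 4
--
-- MAX_LEN_A = 200
--
-- def is_aesthetically_correct(A, len_A):
--     """This method checks if the height of the consecutive trees
--        are aesthtetically correct. What is aestathically correct:
--          1. Two adjacent trees cannot have equal heights
--          2. The trees alternately increase and decrease:
--             a. ...shorter, taller, shorter..
--             a. ...taller, shorter, taller..
--
--     Args:
--         A (list): list of the height of the trees.
--         len_A (int): Length of list A.  4 <= len_A <= 200.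
--
--     Returns:
--         bool: True is is aesthetically pleasing, False otherwise.
--
--     """
--
--     if len_A < MIN_LEN_A or len_A > MAX_LEN_A:
--         return False
--
--     start_taller = True if A[0] > A[1] else False
--     for i in range(1, len_A - 1):
--         if start_taller:
--             if A[i - 1] > A[i] and A[i] < A[i + 1]:
--                 start_taller = False
--                 continue
--             else:
--                 return False
--         else:
--             if A[i - 1] < A[i] and A[i] > A[i+1]:
--                 start_taller = True
--                 continue
--             else:
--                 return False
--     return True
--
-- def number_of_ways_of_cutting_one_tree_aesthetically(A):
--     """This method returns the number of ways of cutting out one tree,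
--        to that the remaining trees are already aesthetically pleasing.
--
--     Args:
--         A (list): list of the height of the trees.
--
--     Returns:
--         int: -1 if there is no way to cut one tree to that remainging trees
--              are aesthetically pleasing. >= 1 if there ways to cut one tree to
--              that remainging trees are aesthetically pleasing.
--
--     """
--
--     _A = list(A)
--     _count = 0
--     for i, tree in enumerate(A):
--         height = _A.pop(i)
--         if is_aesthetically_correct(_A, len_A=len(_A)):
--             _count = _count + 1
--         _A.insert(i, height)
--     if _count == 0:
--         return -1
--     return _count
-- ===== SOURCE B (Python) =====
-- def number_of_ways_of_cutting_one_tree_aesthetically(A):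
--     n = len(A)
--     if n < 5 or n > 201:
--         return -1
--
--     def tri(x, y, z):
--         # the triple check A's flag-loop performs at each interior position
--         return (y < z) if x > y else (x < y and y > z)
--
--     # p = largest k such that the prefix A[0..k] is zigzag (every triple ok)
--     p = 1
--     while p + 1 < n and tri(A[p - 1], A[p], A[p + 1]):
--         p += 1
--     # q = smallest k such that the suffix A[k..] is zigzag
--     q = n - 2
--     while q - 1 >= 0 and tri(A[q - 1], A[q], A[q + 1]):
--         q -= 1
--
--     count = 0
--     for i in range(n):
--         if i == 0:
--             ok = q <= 1
--         elif i == n - 1: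
--             ok = n - 2 <= p
--         else:
--             ok = (i - 1 <= p and q <= i + 1
--                   and (i < 2 or tri(A[i - 2], A[i - 1], A[i + 1]))
--                   and (i > n - 3 or tri(A[i - 1], A[i + 1], A[i + 2])))
--         if ok:
--             count += 1
--     return count if count else -1
-- ===== Notes on version B (the rewrite author's own statement) =====
-- stated objective: faster
-- what changed: A pops each index and re-scans the whole remaining list with is_aesthetically_correct (O(n) per removal); B precomputes the longest zigzag prefix and suffix with two linear scans and decides each removal with an O(1) junction check.
import Mathlib
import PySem

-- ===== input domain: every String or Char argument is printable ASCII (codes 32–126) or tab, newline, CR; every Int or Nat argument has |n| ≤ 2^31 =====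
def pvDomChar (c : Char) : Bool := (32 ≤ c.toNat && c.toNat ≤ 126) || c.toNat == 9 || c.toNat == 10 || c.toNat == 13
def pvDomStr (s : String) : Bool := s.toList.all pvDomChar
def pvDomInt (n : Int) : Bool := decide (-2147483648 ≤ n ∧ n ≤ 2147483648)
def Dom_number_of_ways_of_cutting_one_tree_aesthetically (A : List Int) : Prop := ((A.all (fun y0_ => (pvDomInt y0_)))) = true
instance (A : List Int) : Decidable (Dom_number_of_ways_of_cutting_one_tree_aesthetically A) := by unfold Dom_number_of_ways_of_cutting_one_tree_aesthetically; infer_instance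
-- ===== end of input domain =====

-- B replaces A's "remove each tree and re-scan the whole list" O(n^2) loop by two linear scans
-- (longest zigzag prefix / suffix) and an O(1) junction check per removal; same return value.

-- ===== PORT A =====
-- is_aesthetically_correct's for-loop over range(1, len_A-1) with early return, as recursion on i.
-- Indexing uses pyGetD with default 0: every access A[i-1], A[i], A[i+1] is in range whenever this
-- is called (1 ≤ i < lenA - 1 and lenA = len A), so the default is never consulted.
def aestheticLoop (A : List Int) (lenA : Int) (st : Bool) (i : Int) : Bool :=
  if _h : i < lenA - 1 then
    if st then
      if PySem.List.pyGetD A (i-1) 0 > PySem.List.pyGetD A i 0 ∧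
         PySem.List.pyGetD A i 0 < PySem.List.pyGetD A (i+1) 0 then
        aestheticLoop A lenA false (i+1)
      else false
    else
      if PySem.List.pyGetD A (i-1) 0 < PySem.List.pyGetD A i 0 ∧
         PySem.List.pyGetD A i 0 > PySem.List.pyGetD A (i+1) 0 then
        aestheticLoop A lenA true (i+1)
      else false
  else true
termination_by (lenA - 1 - i).toNat
decreasing_by all_goals omega

def is_aesthetically_correct (A : List Int) (lenA : Int) : Bool :=
  if lenA < 4 ∨ lenA > 200 then false
  else
    -- A[0] > A[1]: in range since 4 ≤ lenA = len A at every call site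
    aestheticLoop A lenA (decide (PySem.List.pyGetD A 0 0 > PySem.List.pyGetD A 1 0)) 1

def number_of_ways_of_cutting_one_tree_aesthetically (A : List Int) : Int :=
  let r := (PySem.List.enumerate A 0).foldl (fun (s : List Int × Int) it =>
    match PySem.List.pop? s.1 it.1 with
    | none => s   -- unreachable: it.1 < len(_A) at every iteration
    | some (height, rest) =>
        let c := if is_aesthetically_correct rest (PySem.List.len rest) then s.2 + 1 else s.2
        (PySem.List.insert rest it.1 height, c)) (A, 0)
  if r.2 = 0 then -1 else r.2

-- ===== PORT B =====
def triB (x y z : Int) : Bool := if x > y then decide (y < z) else decide (x < y ∧ y > z)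

-- while p + 1 < n and tri(A[p-1], A[p], A[p+1]): p += 1
def scanP (A : List Int) (n p : Int) : Int :=
  if _h : p + 1 < n ∧ triB (PySem.List.pyGetD A (p-1) 0) (PySem.List.pyGetD A p 0) (PySem.List.pyGetD A (p+1) 0) = true then
    scanP A n (p+1)
  else p
termination_by (n - 1 - p).toNat
decreasing_by all_goals omega

-- while q - 1 >= 0 and tri(A[q-1], A[q], A[q+1]): q -= 1
def scanQ (A : List Int) (q : Int) : Int :=
  if _h : q - 1 ≥ 0 ∧ triB (PySem.List.pyGetD A (q-1) 0) (PySem.List.pyGetD A q 0) (PySem.List.pyGetD A (q+1) 0) = true then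
    scanQ A (q-1)
  else q
termination_by (q + 1).toNat
decreasing_by all_goals omega

def altBody (A : List Int) (n p q i : Int) : Bool :=
  if i = 0 then decide (q ≤ 1)
  else if i = n - 1 then decide (n - 2 ≤ p)
  else
    decide (i - 1 ≤ p) && decide (q ≤ i + 1) &&
    (decide (i < 2) || triB (PySem.List.pyGetD A (i-2) 0) (PySem.List.pyGetD A (i-1) 0) (PySem.List.pyGetD A (i+1) 0)) &&
    (decide (i > n - 3) || triB (PySem.List.pyGetD A (i-1) 0) (PySem.List.pyGetD A (i+1) 0) (PySem.List.pyGetD A (i+2) 0))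

def number_of_ways_of_cutting_one_tree_aesthetically_alt (A : List Int) : Int :=
  let n : Int := PySem.List.len A
  if n < 5 ∨ n > 201 then -1
  else
    let p := scanP A n 1
    let q := scanQ A (n - 2)
    let count := (PySem.List.pyRange 0 n 1).foldl
      (fun c i => if altBody A n p q i then c + 1 else c) 0
    if count = 0 then -1 else count

-- ===== PRECONDITION & SPEC =====
def Spec_number_of_ways_of_cutting_one_tree_aesthetically (A : List Int) (out : Int) : Prop := out = number_of_ways_of_cutting_one_tree_aesthetically_alt A
instance (A : List Int) (out : Int) : Decidable (Spec_number_of_ways_of_cutting_one_tree_aesthetically A out) := by unfold Spec_number_of_ways_of_cutting_one_tree_aesthetically; infer_instance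

-- ===== CLAIM (what is proved, stated in full; the proofs are below) =====
def Claim_equal_number_of_ways_of_cutting_one_tree_aesthetically : Prop := ∀ (A : List Int), Dom_number_of_ways_of_cutting_one_tree_aesthetically A → Spec_number_of_ways_of_cutting_one_tree_aesthetically A (number_of_ways_of_cutting_one_tree_aesthetically A)

-- ===== LEMMAS AND PROOFS =====

-- the triple check at interior index j (Int indexing, default never consulted in the proofs' range)
def triAt (A : List Int) (j : Int) : Bool :=
  triB (PySem.List.pyGetD A j 0) (PySem.List.pyGetD A (j+1) 0) (PySem.List.pyGetD A (j+2) 0)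

-- "every interior triple from index lo on is aesthetically fine"
def ZigFrom (A : List Int) (lo : Int) : Prop :=
  ∀ j : Int, lo ≤ j → j + 2 < (A.length : Int) → triAt A j = true

-- prefix A[0..k] is zigzag
def Pref (A : List Int) (k : Int) : Prop := ∀ j : Int, 0 ≤ j → j + 2 ≤ k → triAt A j = true
-- suffix A[k..] is zigzag
def Suff (A : List Int) (k : Int) : Prop := ∀ j : Int, k ≤ j → j + 2 ≤ (A.length : Int) - 1 → triAt A j = true

theorem zigFrom_cons (A : List Int) (lo : Int) (h : lo + 2 < (A.length : Int)) :
    ZigFrom A lo ↔ (triAt A lo = true ∧ ZigFrom A (lo + 1)) := by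
  constructor
  · intro hz
    exact ⟨hz lo le_rfl h, fun j hj hjl => hz j (by omega) hjl⟩
  · rintro ⟨ht, hz⟩ j hj hjl
    rcases eq_or_lt_of_le hj with rfl | hlt
    · exact ht
    · exact hz j (by omega) hjl

theorem aestheticLoop_char (A : List Int) (i : Int) (h1 : 1 ≤ i) :
    aestheticLoop A (A.length : Int) (decide (PySem.List.pyGetD A (i-1) 0 > PySem.List.pyGetD A i 0)) i
      = true ↔ ZigFrom A (i - 1) := by
  generalize hfuel : ((A.length : Int) - 1 - i).toNat = fuel
  induction fuel generalizing i with
  | zero =>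
    rw [aestheticLoop]
    rw [dif_neg (by omega)]
    simp only [true_iff]
    intro j hj hjl
    omega
  | succ m ih =>
    have e1 : i - 1 + 1 = i := by ring
    have e2 : i - 1 + 2 = i + 1 := by ring
    have e3 : i + 1 - 1 = i := by ring
    by_cases hlt : i < (A.length : Int) - 1
    · rw [aestheticLoop, dif_pos hlt]
      have hz := zigFrom_cons A (i-1) (by omega)
      rw [e1] at hz
      by_cases hxy : PySem.List.pyGetD A (i-1) 0 > PySem.List.pyGetD A i 0
      · rw [if_pos (by simpa using hxy)]
        by_cases hyz : PySem.List.pyGetD A i 0 < PySem.List.pyGetD A (i+1) 0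
        · rw [if_pos ⟨hxy, hyz⟩]
          have IH := ih (i+1) (by omega) (by omega)
          have hd : decide (PySem.List.pyGetD A (i+1-1) 0 > PySem.List.pyGetD A (i+1) 0) = false := by
            rw [e3, decide_eq_false_iff_not]; omega
          rw [hd, e3] at IH
          rw [IH, hz]
          have htri : triAt A (i-1) = true := by
            unfold triAt triB
            rw [e1, e2, if_pos hxy]
            exact decide_eq_true hyz
          simp [htri]
        · rw [if_neg (by tauto)]
          have htri : triAt A (i-1) = false := by
            unfold triAt triB
            rw [e1, e2, if_pos hxy]
            exact decide_eq_false hyz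
          rw [hz]
          simp [htri]
      · rw [if_neg (by simpa using hxy)]
        by_cases hcond : PySem.List.pyGetD A (i-1) 0 < PySem.List.pyGetD A i 0 ∧
            PySem.List.pyGetD A i 0 > PySem.List.pyGetD A (i+1) 0
        · rw [if_pos hcond]
          have IH := ih (i+1) (by omega) (by omega)
          have hd : decide (PySem.List.pyGetD A (i+1-1) 0 > PySem.List.pyGetD A (i+1) 0) = true := by
            rw [e3, decide_eq_true_iff]; exact hcond.2
          rw [hd, e3] at IH
          rw [IH, hz]
          have htri : triAt A (i-1) = true := by
            unfold triAt triB
            rw [e1, e2, if_neg hxy]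
            exact decide_eq_true hcond
          simp [htri]
        · rw [if_neg hcond]
          have htri : triAt A (i-1) = false := by
            unfold triAt triB
            rw [e1, e2, if_neg hxy]
            exact decide_eq_false hcond
          rw [hz]
          simp [htri]
    · rw [aestheticLoop, dif_neg hlt]
      simp only [true_iff]
      intro j hj hjl
      omega

theorem isaes_char (A : List Int) (lenA : Int) (hlen : lenA = (A.length : Int)) :
    is_aesthetically_correct A lenA = true ↔ (4 ≤ lenA ∧ lenA ≤ 200 ∧ ZigFrom A 0) := by
  subst hlen
  unfold is_aesthetically_correct
  split_ifs with h
  · simp only [false_iff]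
    rintro ⟨h4, h200, -⟩
    omega
  · have hc := aestheticLoop_char A 1 le_rfl
    norm_num at hc
    rw [hc]
    push_neg at h
    constructor
    · intro hzf
      exact ⟨h.1, h.2, hzf⟩
    · exact fun hp => hp.2.2

theorem triAt_shift (A : List Int) (p : Int) :
    triB (PySem.List.pyGetD A (p-1) 0) (PySem.List.pyGetD A p 0) (PySem.List.pyGetD A (p+1) 0)
      = triAt A (p-1) := by
  unfold triAt
  rw [show p - 1 + 1 = p by ring, show p - 1 + 2 = p + 1 by ring]

theorem scanP_aux (A : List Int) (n : Int) (p0 : Int) (h1 : 1 ≤ p0) (h2 : p0 ≤ n - 1)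
    (hpre : Pref A p0) :
    p0 ≤ scanP A n p0 ∧ scanP A n p0 ≤ n - 1 ∧ Pref A (scanP A n p0) ∧
      (scanP A n p0 = n - 1 ∨ triAt A (scanP A n p0 - 1) = false) := by
  generalize hfuel : (n - 1 - p0).toNat = fuel
  induction fuel generalizing p0 with
  | zero =>
    rw [scanP, dif_neg (by omega)]
    exact ⟨le_rfl, h2, hpre, Or.inl (by omega)⟩
  | succ m ih =>
    rw [scanP]
    split_ifs with h
    · have htri : triAt A (p0 - 1) = true := by rw [← triAt_shift]; exact h.2
      have hpre' : Pref A (p0 + 1) := by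
        intro j hj hjl
        rcases eq_or_lt_of_le hjl with he | hlt
        · have : j = p0 - 1 := by omega
          rw [this]; exact htri
        · exact hpre j hj (by omega)
      have := ih (p0 + 1) (by omega) (by omega) hpre' (by omega)
      exact ⟨by omega, this.2.1, this.2.2.1, this.2.2.2⟩
    · push_neg at h
      rcases lt_or_ge p0 (n - 1) with hl | hl
      · exact ⟨le_rfl, h2, hpre, Or.inr (by rw [← triAt_shift]; simpa using h (by omega))⟩
      · exact ⟨le_rfl, h2, hpre, Or.inl (by omega)⟩

theorem scanP_spec (A : List Int) (n : Int) (hn : n = (A.length : Int)) (h5 : 5 ≤ n) :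
    1 ≤ scanP A n 1 ∧ scanP A n 1 ≤ n - 1 ∧ Pref A (scanP A n 1) ∧
      (scanP A n 1 = n - 1 ∨ triAt A (scanP A n 1 - 1) = false) := by
  exact scanP_aux A n 1 le_rfl (by omega) (fun j hj hjl => absurd hjl (by omega))

theorem scanQ_aux (A : List Int) (n : Int) (hn : n = (A.length : Int)) (q0 : Int)
    (h1 : 0 ≤ q0) (h2 : q0 ≤ n - 2) (hsuf : Suff A q0) :
    0 ≤ scanQ A q0 ∧ scanQ A q0 ≤ q0 ∧ Suff A (scanQ A q0) ∧
      (scanQ A q0 = 0 ∨ triAt A (scanQ A q0 - 1) = false) := by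
  generalize hfuel : (q0 + 1).toNat = fuel
  induction fuel generalizing q0 with
  | zero =>
    rw [scanQ, dif_neg (by omega)]
    exact ⟨h1, le_rfl, hsuf, Or.inl (by omega)⟩
  | succ m ih =>
    rw [scanQ]
    split_ifs with h
    · have htri : triAt A (q0 - 1) = true := by rw [← triAt_shift]; exact h.2
      have hsuf' : Suff A (q0 - 1) := by
        intro j hj hjl
        rcases eq_or_lt_of_le hj with he | hlt
        · rw [← he]; exact htri
        · exact hsuf j (by omega) hjl
      have := ih (q0 - 1) (by omega) (by omega) hsuf' (by omega)
      exact ⟨this.1, by omega, this.2.2.1, this.2.2.2⟩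
    · push_neg at h
      rcases lt_or_ge 0 q0 with hl | hl
      · exact ⟨h1, le_rfl, hsuf, Or.inr (by rw [← triAt_shift]; simpa using h (by omega))⟩
      · exact ⟨h1, le_rfl, hsuf, Or.inl (by omega)⟩

theorem scanQ_spec (A : List Int) (n : Int) (hn : n = (A.length : Int)) (h5 : 5 ≤ n) :
    0 ≤ scanQ A (n-2) ∧ scanQ A (n-2) ≤ n - 2 ∧ Suff A (scanQ A (n-2)) ∧
      (scanQ A (n-2) = 0 ∨ triAt A (scanQ A (n-2) - 1) = false) := by
  have := scanQ_aux A n hn (n-2) (by omega) (by omega)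
    (fun j hj hjl => absurd hjl (by omega))
  exact ⟨this.1, by omega, this.2.2.1, this.2.2.2⟩

theorem pref_iff (A : List Int) (n : Int) (hn : n = (A.length : Int)) (h5 : 5 ≤ n)
    (k : Int) (hk0 : 0 ≤ k) (hk : k ≤ n - 1) :
    (k ≤ scanP A n 1) ↔ Pref A k := by
  obtain ⟨hp1, hpn, hppre, hpend⟩ := scanP_spec A n hn h5
  constructor
  · intro hkp j hj hjl
    exact hppre j hj (by omega)
  · intro hpk
    by_contra hlt
    push_neg at hlt
    rcases hpend with he | hf
    · omega
    · exact absurd (hpk (scanP A n 1 - 1) (by omega) (by omega)) (by simp [hf])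

theorem suff_iff (A : List Int) (n : Int) (hn : n = (A.length : Int)) (h5 : 5 ≤ n)
    (k : Int) (hk0 : 0 ≤ k) (hk : k ≤ n - 1) :
    (scanQ A (n-2) ≤ k) ↔ Suff A k := by
  obtain ⟨hq0, hqn, hqsuf, hqend⟩ := scanQ_spec A n hn h5
  constructor
  · intro hqk j hj hjl
    exact hqsuf j (by omega) hjl
  · intro hsk
    by_contra hlt
    push_neg at hlt
    rcases hqend with he | hf
    · omega
    · exact absurd (hsk (scanQ A (n-2) - 1) (by omega) (by omega)) (by simp [hf])

theorem pyGetD_erase (A : List Int) (i : Nat) (hi : i < A.length) (m : Int)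
    (hm0 : 0 ≤ m) (hml : m < (A.length : Int) - 1) :
    PySem.List.pyGetD (A.eraseIdx i) m 0
      = if m < (i : Int) then PySem.List.pyGetD A m 0 else PySem.List.pyGetD A (m+1) 0 := by
  have hlen : (A.eraseIdx i).length = A.length - 1 := by
    rw [List.length_eraseIdx]; simp [hi]
  rw [PySem.List.pyGetD_eq_getElem _ 0 hm0 (by rw [hlen]; omega)]
  split_ifs with h
  · rw [PySem.List.pyGetD_eq_getElem _ 0 hm0 (by omega)]
    exact List.getElem_eraseIdx_of_lt _ (by omega)
  · rw [PySem.List.pyGetD_eq_getElem _ 0 (by omega) (by omega)]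
    rw [List.getElem_eraseIdx_of_ge _ (by omega)]
    congr 1
    omega

theorem triAt_erase (A : List Int) (i : Int) (hi0 : 0 ≤ i) (hin : i < (A.length : Int))
    (j : Int) (hj : 0 ≤ j) (hjl : j + 2 < (A.length : Int) - 1) :
    triAt (A.eraseIdx i.toNat) j =
      triB (if j < i then PySem.List.pyGetD A j 0 else PySem.List.pyGetD A (j+1) 0)
           (if j + 1 < i then PySem.List.pyGetD A (j+1) 0 else PySem.List.pyGetD A (j+2) 0)
           (if j + 2 < i then PySem.List.pyGetD A (j+2) 0 else PySem.List.pyGetD A (j+3) 0) := by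
  have hiN : ((i.toNat : Nat) : Int) = i := Int.toNat_of_nonneg hi0
  unfold triAt
  rw [pyGetD_erase A i.toNat (by omega) j hj (by omega),
      pyGetD_erase A i.toNat (by omega) (j+1) (by omega) (by omega),
      pyGetD_erase A i.toNat (by omega) (j+2) (by omega) (by omega)]
  rw [hiN, show j + 1 + 1 = j + 2 by ring, show j + 2 + 1 = j + 3 by ring]

theorem lenE (A : List Int) (i : Int) (hi0 : 0 ≤ i) (hin : i < (A.length : Int)) :
    ((A.eraseIdx i.toNat).length : Int) = (A.length : Int) - 1 := by
  rw [List.length_eraseIdx]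
  split_ifs with h
  · omega
  · omega

theorem zig_erase_zero (A : List Int) (n : Int) (hn : n = (A.length : Int)) (h5 : 5 ≤ n) :
    (ZigFrom (A.eraseIdx (0 : Int).toNat) 0 ↔ Suff A 1) := by
  have hE := lenE A 0 le_rfl (by omega)
  constructor
  · intro hz j hj hjl
    have := hz (j-1) (by omega) (by rw [hE]; omega)
    rw [triAt_erase A 0 le_rfl (by omega) (j-1) (by omega) (by omega)] at this
    rw [if_neg (by omega), if_neg (by omega), if_neg (by omega)] at this
    rw [show j - 1 + 1 = j by ring, show j - 1 + 2 = j + 1 by ring,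
        show j - 1 + 3 = j + 2 by ring] at this
    exact this
  · intro hs j hj hjl
    rw [hE] at hjl
    rw [triAt_erase A 0 le_rfl (by omega) j hj (by omega)]
    rw [if_neg (by omega), if_neg (by omega), if_neg (by omega)]
    have := hs (j+1) (by omega) (by omega)
    unfold triAt at this
    rw [show j + 1 + 1 = j + 2 by ring, show j + 1 + 2 = j + 3 by ring] at this
    exact this

theorem zig_erase_last (A : List Int) (n : Int) (hn : n = (A.length : Int)) (h5 : 5 ≤ n) :
    (ZigFrom (A.eraseIdx (n-1).toNat) 0 ↔ Pref A (n-2)) := by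
  have hE := lenE A (n-1) (by omega) (by omega)
  constructor
  · intro hz j hj hjl
    have := hz j hj (by rw [hE]; omega)
    rw [triAt_erase A (n-1) (by omega) (by omega) j hj (by omega)] at this
    rw [if_pos (by omega), if_pos (by omega), if_pos (by omega)] at this
    exact this
  · intro hp j hj hjl
    rw [hE] at hjl
    rw [triAt_erase A (n-1) (by omega) (by omega) j hj (by omega)]
    rw [if_pos (by omega), if_pos (by omega), if_pos (by omega)]
    exact hp j hj (by omega)

theorem zig_erase_mid (A : List Int) (n : Int) (hn : n = (A.length : Int)) (h5 : 5 ≤ n)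
    (i : Int) (h1 : 1 ≤ i) (h2 : i ≤ n - 2) :
    (ZigFrom (A.eraseIdx i.toNat) 0 ↔
      (Pref A (i-1) ∧ Suff A (i+1) ∧
       (2 ≤ i → triB (PySem.List.pyGetD A (i-2) 0) (PySem.List.pyGetD A (i-1) 0) (PySem.List.pyGetD A (i+1) 0) = true) ∧
       (i ≤ n - 3 → triB (PySem.List.pyGetD A (i-1) 0) (PySem.List.pyGetD A (i+1) 0) (PySem.List.pyGetD A (i+2) 0) = true))) := by
  have hE := lenE A i (by omega) (by omega)
  constructor
  · intro hz
    refine ⟨?_, ?_, ?_, ?_⟩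
    · intro j hj hjl
      have := hz j hj (by rw [hE]; omega)
      rw [triAt_erase A i (by omega) (by omega) j hj (by omega)] at this
      rw [if_pos (by omega), if_pos (by omega), if_pos (by omega)] at this
      exact this
    · intro j hj hjl
      have := hz (j-1) (by omega) (by rw [hE]; omega)
      rw [triAt_erase A i (by omega) (by omega) (j-1) (by omega) (by omega)] at this
      rw [if_neg (by omega), if_neg (by omega), if_neg (by omega)] at this
      rw [show j - 1 + 1 = j by ring, show j - 1 + 2 = j + 1 by ring,
          show j - 1 + 3 = j + 2 by ring] at this
      exact this
    · intro h2i
      have := hz (i-2) (by omega) (by rw [hE]; omega)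
      rw [triAt_erase A i (by omega) (by omega) (i-2) (by omega) (by omega)] at this
      rw [if_pos (by omega), if_pos (by omega), if_neg (by omega)] at this
      rw [show i - 2 + 1 = i - 1 by ring, show i - 2 + 3 = i + 1 by ring] at this
      exact this
    · intro h3
      have := hz (i-1) (by omega) (by rw [hE]; omega)
      rw [triAt_erase A i (by omega) (by omega) (i-1) (by omega) (by omega)] at this
      rw [if_pos (by omega), if_neg (by omega), if_neg (by omega)] at this
      rw [show i - 1 + 2 = i + 1 by ring, show i - 1 + 3 = i + 2 by ring] at this
      exact this
  · rintro ⟨hp, hs, hc1, hc2⟩ j hj hjl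
    rw [hE] at hjl
    rw [triAt_erase A i (by omega) (by omega) j hj (by omega)]
    by_cases ha : j + 2 ≤ i - 1
    · rw [if_pos (by omega), if_pos (by omega), if_pos (by omega)]
      exact hp j hj (by omega)
    · by_cases hb : i ≤ j
      · rw [if_neg (by omega), if_neg (by omega), if_neg (by omega)]
        have := hs (j+1) (by omega) (by omega)
        unfold triAt at this
        rw [show j + 1 + 1 = j + 2 by ring, show j + 1 + 2 = j + 3 by ring] at this
        exact this
      · by_cases hcq : j = i - 2
        · subst hcq
          rw [if_pos (by omega), if_pos (by omega), if_neg (by omega)]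
          rw [show i - 2 + 1 = i - 1 by ring, show i - 2 + 3 = i + 1 by ring]
          exact hc1 (by omega)
        · have hje : j = i - 1 := by omega
          subst hje
          rw [if_pos (by omega), if_neg (by omega), if_neg (by omega)]
          rw [show i - 1 + 2 = i + 1 by ring, show i - 1 + 3 = i + 2 by ring]
          exact hc2 (by omega)

-- the per-removal equivalence: A's full re-scan of the erased list = B's O(1) check
theorem per_index (A : List Int) (n : Int) (hn : n = (A.length : Int)) (h5 : 5 ≤ n) (h201 : n ≤ 201)
    (i : Int) (hi0 : 0 ≤ i) (hin : i < n) :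
    is_aesthetically_correct (A.eraseIdx i.toNat) (n - 1)
      = altBody A n (scanP A n 1) (scanQ A (n-2)) i := by
  have hE := lenE A i (by omega) (by omega)
  rw [Bool.eq_iff_iff]
  rw [isaes_char _ (n-1) (by omega)]
  unfold altBody
  by_cases hiz : i = 0
  · subst hiz
    rw [if_pos rfl]
    rw [zig_erase_zero A n hn h5]
    rw [← suff_iff A n hn h5 1 (by omega) (by omega)]
    simp only [decide_eq_true_eq]
    omega
  · by_cases hil : i = n - 1
    · subst hil
      rw [if_neg hiz, if_pos rfl]
      rw [zig_erase_last A n hn h5]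
      rw [← pref_iff A n hn h5 (n-2) (by omega) (by omega)]
      simp only [decide_eq_true_eq]
      omega
    · rw [if_neg hiz, if_neg hil]
      rw [zig_erase_mid A n hn h5 i (by omega) (by omega)]
      rw [← pref_iff A n hn h5 (i-1) (by omega) (by omega),
          ← suff_iff A n hn h5 (i+1) (by omega) (by omega)]
      simp only [Bool.and_eq_true, Bool.or_eq_true, decide_eq_true_eq]
      constructor
      · rintro ⟨h4, hA200, hpref, hsuf, hcr1, hcr2⟩
        refine ⟨⟨⟨hpref, hsuf⟩, ?_⟩, ?_⟩
        · by_cases h2i : 2 ≤ i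
          · exact Or.inr (hcr1 h2i)
          · exact Or.inl (by omega)
        · by_cases h3i : i ≤ n - 3
          · exact Or.inr (hcr2 h3i)
          · exact Or.inl (by omega)
      · rintro ⟨⟨⟨hpref, hsuf⟩, hcr1⟩, hcr2⟩
        refine ⟨by omega, by omega, hpref, hsuf, ?_, ?_⟩
        · intro h2i
          rcases hcr1 with h | h
          · omega
          · exact h
        · intro h3i
          rcases hcr2 with h | h
          · omega
          · exact h

-- A's main loop leaves _A = A and counts the valid removals
theorem foldA_eq (A : List Int) (l : List (Int × Int)) (c : Int)
    (hl : ∀ pr ∈ l, 0 ≤ pr.1 ∧ pr.1 < (A.length : Int)) :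
    (l.foldl (fun (s : List Int × Int) it =>
      match PySem.List.pop? s.1 it.1 with
      | none => s
      | some (height, rest) =>
          let c := if is_aesthetically_correct rest (PySem.List.len rest) then s.2 + 1 else s.2
          (PySem.List.insert rest it.1 height, c)) (A, c))
    = (A, c + (l.countP (fun pr => is_aesthetically_correct (A.eraseIdx pr.1.toNat) ((A.length : Int) - 1)) : Int)) := by
  induction l generalizing c with
  | nil => simp
  | cons pr l ih =>
    obtain ⟨h0, hlen⟩ := hl pr List.mem_cons_self
    obtain ⟨k, hk⟩ : ∃ k : Nat, pr.1 = (k : Int) := ⟨pr.1.toNat, (Int.toNat_of_nonneg h0).symm⟩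
    have hklt : k < A.length := by omega
    have htn : pr.1.toNat = k := by omega
    have hpop : PySem.List.pop? A pr.1 = some (A[k], A.eraseIdx k) := by
      rw [hk]
      exact PySem.List.pop?_natCast A k hklt
    have hins : PySem.List.insert (A.eraseIdx k) pr.1 (A[k]) = A := by
      rw [hk]
      rw [PySem.List.insert_natCast _ k _ (by rw [List.length_eraseIdx]; simp [hklt]; omega)]
      rw [List.eraseIdx_eq_take_drop_succ]
      rw [List.take_left' (by simp; omega), List.drop_left' (by simp; omega)]
      rw [List.getElem_cons_drop hklt, List.take_append_drop]
    have hlenr : PySem.List.len (A.eraseIdx k) = (A.length : Int) - 1 := by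
      simp only [PySem.List.len_eq]
      rw [List.length_eraseIdx]
      simp [hklt]
      omega
    simp only [List.foldl_cons, hpop, hins, hlenr]
    rw [ih _ (fun q hq => hl q (List.mem_cons_of_mem _ hq))]
    simp only [List.countP_cons, htn]
    push_cast
    split_ifs <;> ring

theorem main_eq (A : List Int) :
    number_of_ways_of_cutting_one_tree_aesthetically A = number_of_ways_of_cutting_one_tree_aesthetically_alt A := by
  have hl : ∀ pr ∈ PySem.List.enumerate A 0, 0 ≤ pr.1 ∧ pr.1 < (A.length : Int) := by
    intro pr hpr
    rw [PySem.List.mem_enumerate_iff] at hpr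
    obtain ⟨k, hk, rfl⟩ := hpr
    constructor
    · simp
    · simp
      omega
  unfold number_of_ways_of_cutting_one_tree_aesthetically
      number_of_ways_of_cutting_one_tree_aesthetically_alt
  rw [foldA_eq A _ 0 hl]
  have hlen : PySem.List.len A = (A.length : Int) := by simp
  by_cases hrange : PySem.List.len A < 5 ∨ PySem.List.len A > 201
  · rw [if_pos hrange]
    rw [hlen] at hrange
    have hz : (PySem.List.enumerate A 0).countP
        (fun pr => is_aesthetically_correct (A.eraseIdx pr.1.toNat) ((A.length : Int) - 1)) = 0 := by
      rw [List.countP_eq_zero]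
      intro pr _
      unfold is_aesthetically_correct
      rw [if_pos (by omega)]
      simp
    simp [hz]
  · rw [if_neg hrange]
    rw [hlen] at hrange
    push_neg at hrange
    have h5 : 5 ≤ (A.length : Int) := hrange.1
    have h201 : (A.length : Int) ≤ 201 := hrange.2
    simp only []
    rw [PySem.List.foldl_if_add_one, hlen]
    have hcnt : (PySem.List.enumerate A 0).countP
          (fun pr => is_aesthetically_correct (A.eraseIdx pr.1.toNat) ((A.length : Int) - 1))
        = (PySem.List.pyRange 0 (A.length : Int) 1).countP
            (altBody A (A.length : Int) (scanP A (A.length : Int) 1) (scanQ A ((A.length : Int) - 2))) := by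
      have hm : (PySem.List.enumerate A 0).countP
            (fun pr => is_aesthetically_correct (A.eraseIdx pr.1.toNat) ((A.length : Int) - 1))
          = ((PySem.List.enumerate A 0).map (fun pr => pr.1)).countP
              (fun i => is_aesthetically_correct (A.eraseIdx i.toNat) ((A.length : Int) - 1)) := by
        rw [List.countP_map]
        rfl
      rw [hm, PySem.List.map_fst_enumerate]
      simp only [zero_add]
      exact List.countP_congr (fun i hi => by
        rw [PySem.List.mem_pyRange_one] at hi
        rw [per_index A (A.length : Int) rfl h5 h201 i hi.1 hi.2])
    rw [hcnt]

-- ===== VERDICT (by name: the statement is the Claim_ definition above) =====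
theorem number_of_ways_of_cutting_one_tree_aesthetically_spec : Claim_equal_number_of_ways_of_cutting_one_tree_aesthetically := by
  intro A _
  exact main_eq A
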